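-- pv_equiv track=rewrite | github.com/aonishchenko/Hackathon_Pleez_Challenge20260307 | engine.py | _primary_cuisine
-- ===== SOURCE A (Python) =====
-- def _primary_cuisine(tags: list) -> str:
--     priority = ["Sushi","Japanese","American","Burgers","Brazilian","Healthy",
--                 "Chicken","Asian","Desserts","Comfort Food","Latin American",
--                 "Barbecue","Fast Food","Pizza"]
--     for p in priority:
--         if p in tags:
--             return p
--     return tags[0] if tags else "Other"
-- ===== SOURCE B (Python) =====
-- def _primary_cuisine(tags: list) -> str:
--     priority = ["Sushi","Japanese","American","Burgers","Brazilian","Healthy",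
--                 "Chicken","Asian","Desserts","Comfort Food","Latin American",
--                 "Barbecue","Fast Food","Pizza"]
--     rank = {tag: i for i, tag in enumerate(priority)}
--     best = None
--     for t in tags:
--         r = rank.get(t)
--         if r is not None and (best is None or r < best[0]):
--             best = (r, t)
--     if best is not None:
--         return best[1]
--     if tags:
--         return tags[0]
--     return "Other"
-- ===== Notes on version B (the rewrite author's own statement) =====
-- stated objective: alternative
-- what changed: B builds a tag-to-rank dictionary once and scans the input tags in a single pass keeping the lowest-ranked match, instead of scanning the input list once per priority entry.
import Mathlib
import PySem

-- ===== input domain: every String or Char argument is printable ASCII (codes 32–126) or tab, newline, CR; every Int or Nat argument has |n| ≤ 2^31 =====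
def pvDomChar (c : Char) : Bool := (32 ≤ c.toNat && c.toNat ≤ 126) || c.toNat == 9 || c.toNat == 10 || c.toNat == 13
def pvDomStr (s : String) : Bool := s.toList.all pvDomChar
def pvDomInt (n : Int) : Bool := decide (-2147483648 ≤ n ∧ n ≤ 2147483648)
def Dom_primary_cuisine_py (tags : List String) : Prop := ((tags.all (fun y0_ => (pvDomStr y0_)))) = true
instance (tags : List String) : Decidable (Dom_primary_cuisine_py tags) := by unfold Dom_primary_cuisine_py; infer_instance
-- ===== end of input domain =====

-- B replaces A's scan of the input list once per priority entry by a rank dictionary built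
-- once and a single pass over the input tags keeping the lowest-ranked match (alternative).

-- ===== PORT A =====
def pcPriority : List String :=
  ["Sushi","Japanese","American","Burgers","Brazilian","Healthy",
   "Chicken","Asian","Desserts","Comfort Food","Latin American",
   "Barbecue","Fast Food","Pizza"]

-- `for p in priority: if p in tags: return p`, then `return tags[0] if tags else "Other"`
def pcLoopA (tags : List String) : List String → String
  | [] => match tags with
          | [] => "Other"
          | t :: _ => t
  | p :: ps => if tags.contains p then p else pcLoopA tags ps

def primary_cuisine_py (tags : List String) : String :=
  pcLoopA tags pcPriority

-- ===== PORT B =====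
-- rank = {tag: i for i, tag in enumerate(priority)}
def pcRank : PySem.Dict String Int :=
  (PySem.List.enumerate pcPriority).foldl (fun d it => d.insert it.2 it.1) PySem.Dict.empty

-- body of `for t in tags: …` updating best = None | (rank, tag)
def pcStepB (best : Option (Int × String)) (t : String) : Option (Int × String) :=
  match PySem.Dict.get? pcRank t with
  | none => best
  | some r =>
    match best with
    | none => some (r, t)
    | some b => if r < b.1 then some (r, t) else best

def primary_cuisine_py_alt (tags : List String) : String :=
  match tags.foldl pcStepB none with
  | some b => b.2
  | none => match tags with
            | [] => "Other"
            | t :: _ => t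

-- ===== PRECONDITION & SPEC =====
def Spec_primary_cuisine_py (tags : List String) (out : String) : Prop := out = primary_cuisine_py_alt tags
instance (tags : List String) (out : String) : Decidable (Spec_primary_cuisine_py tags out) := by unfold Spec_primary_cuisine_py; infer_instance

-- ===== CLAIM (what is proved, stated in full; the proofs are below) =====
def Claim_equal_primary_cuisine_py : Prop := ∀ (tags : List String), Dom_primary_cuisine_py tags → Spec_primary_cuisine_py tags (primary_cuisine_py tags)

-- ===== LEMMAS AND PROOFS =====

-- the min-fold B performs, on the already-looked-up (rank, tag) pairs
def pcG (best : Option (Int × String)) (p : Int × String) : Option (Int × String) :=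
  match best with
  | none => some p
  | some b => if p.1 < b.1 then some p else best

def pcPairs (tags : List String) : List (Int × String) :=
  tags.filterMap (fun t => (PySem.Dict.get? pcRank t).map (fun r => (r, t)))

theorem pcStepB_eq (best : Option (Int × String)) (t : String) :
    pcStepB best t =
      match (PySem.Dict.get? pcRank t).map (fun r => (r, t)) with
      | none => best
      | some p => pcG best p := by
  cases h : PySem.Dict.get? pcRank t <;> simp [pcStepB, h, pcG]

theorem foldB_eq_foldG (tags : List String) (acc : Option (Int × String)) :
    tags.foldl pcStepB acc = (pcPairs tags).foldl pcG acc := by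
  induction tags generalizing acc with
  | nil => rfl
  | cons t ts ih =>
      simp only [List.foldl_cons, pcPairs, List.filterMap_cons]
      cases h : PySem.Dict.get? pcRank t with
      | none => simpa [pcStepB_eq, h, pcPairs] using ih (pcStepB acc t)
      | some r =>
          rw [pcStepB_eq, h]
          simpa [pcPairs] using ih _

theorem foldG_some (l : List (Int × String)) (a : Int × String) :
    ∃ q, l.foldl pcG (some a) = some q ∧ (q ∈ l ∨ q = a) ∧ q.1 ≤ a.1 ∧
      ∀ p ∈ l, q.1 ≤ p.1 := by
  induction l generalizing a with
  | nil => exact ⟨a, rfl, Or.inr rfl, le_refl _, by simp⟩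
  | cons p ps ih =>
      simp only [List.foldl_cons, pcG]
      by_cases h : p.1 < a.1
      · obtain ⟨q, hq, hmem, hle, hall⟩ := ih p
        refine ⟨q, by simp [h, hq], ?_, le_of_lt (lt_of_le_of_lt hle h), ?_⟩
        · rcases hmem with h' | h'
          · exact Or.inl (List.mem_cons_of_mem _ h')
          · exact Or.inl (h' ▸ List.mem_cons_self)
        · intro x hx
          rcases List.mem_cons.mp hx with rfl | hx
          · exact hle
          · exact hall _ hx
      · obtain ⟨q, hq, hmem, hle, hall⟩ := ih a
        refine ⟨q, by simp [h, hq], ?_, hle, ?_⟩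
        · rcases hmem with h' | h'
          · exact Or.inl (List.mem_cons_of_mem _ h')
          · exact Or.inr h'
        · intro x hx
          rcases List.mem_cons.mp hx with rfl | hx
          · exact le_trans hle (not_lt.mp h)
          · exact hall _ hx

-- the rank dictionary: its items are exactly the (tag, index) pairs of pcPriority
theorem pcRank_items :
    pcRank.items = (PySem.List.enumerate pcPriority).map (fun it => (it.2, it.1)) := by
  have h := PySem.Dict.items_foldl_insert_fresh (PySem.List.enumerate pcPriority)
      (fun it => it.2) (fun it => it.1) PySem.Dict.empty
      (fun a _ => PySem.Dict.contains_empty _)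
      (by rw [PySem.List.map_snd_enumerate]; decide)
  simpa [pcRank] using h

theorem pcRank_keys : pcRank.keys = pcPriority := by
  simp only [PySem.Dict.keys, pcRank_items, List.map_map]
  have h : List.map ((fun x => x.1) ∘ fun (it : Int × String) => (it.2, it.1))
      (PySem.List.enumerate pcPriority) =
      List.map (fun it => it.2) (PySem.List.enumerate pcPriority) := rfl
  rw [h, PySem.List.map_snd_enumerate]

theorem pcRank_keys_nodup : pcRank.keys.Nodup := by
  rw [pcRank_keys]; decide

theorem pcRank_get?_of_idx {i : Nat} (hi : i < pcPriority.length) :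
    PySem.Dict.get? pcRank pcPriority[i] = some (i : Int) := by
  apply PySem.Dict.get?_of_mem_items pcRank _ pcRank_keys_nodup
  rw [pcRank_items]
  refine List.mem_map.mpr ⟨((i : Int), pcPriority[i]), ?_, rfl⟩
  exact (PySem.List.mem_enumerate_iff _ 0 _).mpr ⟨i, hi, by simp⟩

theorem pcRank_get?_some {t : String} {r : Int}
    (h : PySem.Dict.get? pcRank t = some r) :
    ∃ i : Nat, ∃ hi : i < pcPriority.length, pcPriority[i] = t ∧ r = (i : Int) := by
  have hne : PySem.Dict.get? pcRank t ≠ none := by simp [h]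
  have ht : t ∈ pcRank.keys := by
    by_contra hc
    exact hne ((PySem.Dict.get?_eq_none_iff_not_mem_keys pcRank t).mpr hc)
  have ht' : t ∈ pcRank.items.map (·.1) := by
    simpa only [PySem.Dict.keys] using ht
  obtain ⟨p, hp, hfst⟩ := List.mem_map.mp ht'
  obtain ⟨k, v⟩ := p
  dsimp at hfst
  subst hfst
  have hv := PySem.Dict.get?_of_mem_items pcRank hp pcRank_keys_nodup
  rw [h] at hv
  injection hv with hv'
  subst hv'
  obtain ⟨it, hit, heq⟩ := List.mem_map.mp (pcRank_items ▸ hp)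
  obtain ⟨i, hik, hpit⟩ := (PySem.List.mem_enumerate_iff _ 0 _).mp hit
  subst hpit
  injection heq with h1 h2
  refine ⟨i, hik, h1, ?_⟩
  rw [← h2]
  omega

theorem mem_pcPairs {p : Int × String} {tags : List String} :
    p ∈ pcPairs tags ↔ p.2 ∈ tags ∧ PySem.Dict.get? pcRank p.2 = some p.1 := by
  constructor
  · intro h
    obtain ⟨t, ht, hf⟩ := List.mem_filterMap.mp h
    obtain ⟨r, hr, hp⟩ := Option.map_eq_some_iff.mp hf
    cases hp
    exact ⟨ht, hr⟩
  · rintro ⟨ht, hr⟩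
    exact List.mem_filterMap.mpr ⟨p.2, ht, by simp [hr]⟩

-- A's loop over the priority list is find? plus the fallback
theorem pcLoopA_eq (tags : List String) (l : List String) :
    pcLoopA tags l =
      match l.find? (fun p => tags.contains p) with
      | some p => p
      | none => match tags with
                | [] => "Other"
                | t :: _ => t := by
  induction l with
  | nil => rfl
  | cons p ps ih =>
      cases h : tags.contains p
      · rw [List.find?_cons_of_neg (by rw [h]; exact Bool.false_ne_true)]
        show (if tags.contains p = true then p else pcLoopA tags ps) = _
        rw [if_neg (by rw [h]; exact Bool.false_ne_true)]
        exact ih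
      · rw [List.find?_cons_of_pos h]
        show (if tags.contains p = true then p else pcLoopA tags ps) = p
        rw [if_pos h]

-- ===== VERDICT (by name: the statement is the Claim_ definition above) =====
theorem primary_cuisine_py_spec : Claim_equal_primary_cuisine_py := by
  intro tags _
  unfold Spec_primary_cuisine_py primary_cuisine_py primary_cuisine_py_alt
  rw [pcLoopA_eq, foldB_eq_foldG]
  cases hf : pcPriority.find? (fun p => tags.contains p) with
  | none =>
      have hnone : ∀ p ∈ pcPriority, ¬ tags.contains p = true := List.find?_eq_none.mp hf
      have hbs : pcPairs tags = [] := by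
        apply List.filterMap_eq_nil_iff.mpr
        intro t ht
        cases hg : PySem.Dict.get? pcRank t with
        | none => simp
        | some r =>
            obtain ⟨i, hi, hpt, _⟩ := pcRank_get?_some hg
            exact absurd (List.contains_iff_mem.mpr (hpt ▸ ht))
              (hnone _ (hpt ▸ List.getElem_mem hi))
      rw [hbs]
      rfl
  | some pstar =>
      obtain ⟨hps, i, hi, hgi, hlt⟩ := List.find?_eq_some_iff_getElem.mp hf
      have hmem : ((i : Int), pstar) ∈ pcPairs tags :=
        mem_pcPairs.mpr ⟨List.contains_iff_mem.mp hps, hgi ▸ pcRank_get?_of_idx hi⟩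
      obtain ⟨b0, rest, hbs⟩ : ∃ b0 rest, pcPairs tags = b0 :: rest := by
        cases h : pcPairs tags with
        | nil => rw [h] at hmem; simp at hmem
        | cons b0 rest => exact ⟨b0, rest, rfl⟩
      rw [hbs]
      simp only [List.foldl_cons]
      have hg0 : pcG none b0 = some b0 := rfl
      rw [hg0]
      obtain ⟨q, hq, hqmem, hqle0, hqle⟩ := foldG_some rest b0
      rw [hq]
      have hq_in : q ∈ pcPairs tags := by
        rw [hbs]
        rcases hqmem with h' | h'
        · exact List.mem_cons_of_mem _ h'
        · exact h' ▸ List.mem_cons_self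
      have hqmin : ∀ p ∈ pcPairs tags, q.1 ≤ p.1 := by
        intro p hp
        rw [hbs] at hp
        rcases List.mem_cons.mp hp with rfl | hp
        · exact hqle0
        · exact hqle _ hp
      obtain ⟨htags, hget⟩ := mem_pcPairs.mp hq_in
      obtain ⟨j, hj, hpj, hrj⟩ := pcRank_get?_some hget
      have hle_i : q.1 ≤ (i : Int) := hqmin _ hmem
      have hij : i ≤ j := by
        by_contra hc
        have hb := hlt j (Nat.lt_of_not_le hc)
        simp [hpj] at hb
        exact hb htags
      have hji : j = i := by omega
      subst hji
      show pstar = q.2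
      rw [← hgi]
      exact hpj
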